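-- pv_equiv track=rewrite | github.com/BrettRey/erdos-problem-993 | proof_lc_constraint.py | make_lc_poly
-- ===== SOURCE A (Python) =====
-- def make_lc_poly(factors):
--     poly = [1]
--     for t in factors:
--         new_poly = [0] * (len(poly) + 1)
--         for i, c in enumerate(poly):
--             new_poly[i] += c
--             new_poly[i+1] += c * t
--         poly = new_poly
--     return poly
-- ===== SOURCE B (Python) =====
-- def _add(p, q):
--     n = max(len(p), len(q))
--     p = p + [0] * (n - len(p))
--     q = q + [0] * (n - len(q))
--     return [a + b for a, b in zip(p, q)]
--
-- def _conv(p, q):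
--     r = []
--     for a in reversed(p):
--         r = _add([a * x for x in q], [0] + r)
--     return r
--
-- def make_lc_poly(factors):
--     if not factors:
--         return [1]
--     if len(factors) == 1:
--         return [1, factors[0]]
--     mid = len(factors) // 2
--     return _conv(make_lc_poly(factors[:mid]), make_lc_poly(factors[mid:]))
-- ===== Notes on version B (the rewrite author's own statement) =====
-- stated objective: alternative
-- what changed: Replaces A's left fold that multiplies in one linear factor at a time by a divide-and-conquer scheme: split the factor list into halves, recursively build each half's coefficient list, and combine the two partial-product polynomials with an integer convolution.
import Mathlib
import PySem

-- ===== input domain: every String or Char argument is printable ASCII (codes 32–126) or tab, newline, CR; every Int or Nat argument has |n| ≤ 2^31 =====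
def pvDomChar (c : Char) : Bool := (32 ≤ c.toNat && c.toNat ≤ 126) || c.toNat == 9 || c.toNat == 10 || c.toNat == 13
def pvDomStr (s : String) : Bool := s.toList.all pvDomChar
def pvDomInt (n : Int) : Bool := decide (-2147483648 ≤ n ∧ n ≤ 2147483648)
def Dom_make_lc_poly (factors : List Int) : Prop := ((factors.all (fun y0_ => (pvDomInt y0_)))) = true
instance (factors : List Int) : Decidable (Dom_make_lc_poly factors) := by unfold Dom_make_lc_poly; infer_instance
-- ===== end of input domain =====

-- B re-implements the product of linear factors by divide-and-conquer (split, recurse, convolve)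
-- instead of A's fold that multiplies in one factor at a time; same cost class, alternative structure.

-- ===== PORT A =====
-- one iteration of A's outer loop: build new_poly and run the enumerate loop of index updates
def stepA (poly : List Int) (t : Int) : List Int :=
  (PySem.List.enumerate poly 0).foldl (fun np ic =>
      let np1 := PySem.List.pySetD np ic.1 (PySem.List.pyGetD np ic.1 0 + ic.2)
      PySem.List.pySetD np1 (ic.1 + 1) (PySem.List.pyGetD np1 (ic.1 + 1) 0 + ic.2 * t))
    (List.replicate (poly.length + 1) (0:Int))

def make_lc_poly (factors : List Int) : List Int :=
  factors.foldl stepA [1]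

-- ===== PORT B =====
-- _add: pad both coefficient lists to the common length, then add pointwise
def addPoly (p q : List Int) : List Int :=
  let n := max p.length q.length
  List.zipWith (· + ·) (p ++ List.replicate (n - p.length) (0:Int))
               (q ++ List.replicate (n - q.length) (0:Int))

-- _conv: fold over p from the right, shifting and adding a*q each time
def convPoly (p q : List Int) : List Int :=
  p.foldr (fun a r => addPoly (q.map (a * ·)) (0 :: r)) []

def make_lc_poly_alt (factors : List Int) : List Int :=
  match factors with
  | [] => [1]
  | [t] => [1, t]
  | a :: b :: rest =>
    let xs := a :: b :: rest
    -- len(factors) // 2 on a nonnegative length is Nat division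
    convPoly (make_lc_poly_alt (xs.take (xs.length / 2)))
             (make_lc_poly_alt (xs.drop (xs.length / 2)))
termination_by factors.length
decreasing_by
  · simp; omega
  · simp; omega

-- ===== PRECONDITION & SPEC =====
def Spec_make_lc_poly (factors : List Int) (out : List Int) : Prop := out = make_lc_poly_alt factors
instance (factors : List Int) (out : List Int) : Decidable (Spec_make_lc_poly factors out) := by unfold Spec_make_lc_poly; infer_instance

-- ===== CLAIM (what is proved, stated in full; the proofs are below) =====
def Claim_equal_make_lc_poly : Prop := ∀ (factors : List Int), Dom_make_lc_poly factors → Spec_make_lc_poly factors (make_lc_poly factors)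

-- ===== LEMMAS AND PROOFS =====

-- the list A's inner loop produces when the running state starts as a :: 0…0
def gpoly (t : Int) : List Int → Int → List Int
  | [], a => [a]
  | c :: p, a => (a + c) :: gpoly t p (c * t)

-- A's inner lambda, named so the lemmas can speak about it
def innerStep (t : Int) (np : List Int) (ic : Int × Int) : List Int :=
  let np1 := PySem.List.pySetD np ic.1 (PySem.List.pyGetD np ic.1 0 + ic.2)
  PySem.List.pySetD np1 (ic.1 + 1) (PySem.List.pyGetD np1 (ic.1 + 1) 0 + ic.2 * t)

theorem addPoly_nil_right (p : List Int) : addPoly p [] = p := by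
  simp [addPoly]
  induction p with
  | nil => simp
  | cons a p ih => simp [List.replicate_succ, ih]
theorem addPoly_nil_left (q : List Int) : addPoly [] q = q := by
  simp [addPoly]
  induction q with
  | nil => simp
  | cons a q ih => simp [List.replicate_succ, ih]
theorem addPoly_cons_cons (a b : Int) (p q : List Int) :
    addPoly (a :: p) (b :: q) = (a + b) :: addPoly p q := by
  simp [addPoly, Nat.succ_max_succ]

theorem gpoly_ne_nil (t : Int) (p : List Int) (a : Int) : gpoly t p a ≠ [] := by
  cases p <;> simp [gpoly]

theorem gpoly_add (t : Int) : ∀ (u v : List Int) (c d : Int),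
    gpoly t (addPoly u v) (c + d) = addPoly (gpoly t u c) (gpoly t v d) := by
  intro u
  induction u with
  | nil =>
    intro v c d
    cases v with
    | nil => simp [gpoly, addPoly_cons_cons, addPoly_nil_right]
    | cons b v =>
      simp only [addPoly_nil_left, gpoly, addPoly_cons_cons, addPoly_nil_left]
      ring_nf
  | cons x u ih =>
    intro v c d
    cases v with
    | nil =>
      simp only [addPoly_nil_right, gpoly, addPoly_cons_cons, addPoly_nil_right]
      ring_nf
    | cons b v =>
      simp only [addPoly_cons_cons, gpoly]
      rw [show (x + b) * t = x * t + b * t by ring, ih]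
      congr 1
      ring

theorem gpoly_map (t m : Int) : ∀ (u : List Int) (c : Int),
    (gpoly t u c).map (m * ·) = gpoly t (u.map (m * ·)) (m * c) := by
  intro u
  induction u with
  | nil => intro c; simp [gpoly]
  | cons x u ih =>
    intro c
    simp only [gpoly, List.map_cons, ih]
    rw [mul_add, ← mul_assoc]

theorem convPoly_cons (x : Int) (p q : List Int) :
    convPoly (x :: p) q = addPoly (q.map (x * ·)) (0 :: convPoly p q) := rfl

theorem convPoly_single (x : Int) (q : List Int) (hq : q ≠ []) :
    convPoly [x] q = q.map (x * ·) := by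
  rw [convPoly_cons]
  cases q with
  | nil => exact absurd rfl hq
  | cons y ys =>
    simp only [List.map_cons, addPoly_cons_cons, convPoly]
    simp [addPoly_nil_right]

theorem gpoly_zero_cons (t : Int) (y : List Int) :
    gpoly t (0 :: y) 0 = 0 :: gpoly t y 0 := by
  simp [gpoly]

theorem convPoly_gpoly (t : Int) : ∀ (p q : List Int), p ≠ [] → q ≠ [] →
    convPoly p (gpoly t q 0) = gpoly t (convPoly p q) 0 := by
  intro p
  induction p with
  | nil => intro q h; exact absurd rfl h
  | cons x p ih =>
    intro q _ hq
    cases p with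
    | nil =>
      rw [convPoly_single x _ (gpoly_ne_nil t q 0), convPoly_single x q hq,
          gpoly_map t x q 0]
      simp
    | cons y p' =>
      have h1 : convPoly (x :: y :: p') (gpoly t q 0)
          = addPoly (gpoly t (q.map (x * ·)) 0) (0 :: gpoly t (convPoly (y :: p') q) 0) := by
        rw [convPoly_cons, gpoly_map t x q 0, mul_zero, ih q (by simp) hq]
      have h2 : gpoly t (convPoly (x :: y :: p') q) 0
          = addPoly (gpoly t (q.map (x * ·)) 0) (gpoly t (0 :: convPoly (y :: p') q) 0) := by
        rw [convPoly_cons]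
        simpa using gpoly_add t (q.map (x * ·)) (0 :: convPoly (y :: p') q) 0 0
      rw [h1, h2, gpoly_zero_cons]

theorem convPoly_one : ∀ (p : List Int), convPoly p [1] = p := by
  intro p
  induction p with
  | nil => rfl
  | cons x p ih =>
    rw [convPoly_cons]
    simp [addPoly_cons_cons, addPoly_nil_left, ih]

theorem innerStep_cons_succ (t x c : Int) (np : List Int) (n : Nat) :
    innerStep t (x :: np) ((n : Int) + 1, c) = x :: innerStep t np ((n : Int), c) := by
  have h1 : ((n : Int) + 1) = ((n + 1 : Nat) : Int) := by push_cast; ring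
  have h2 : (((n + 1 : Nat) : Int) + 1) = ((n + 2 : Nat) : Int) := by push_cast; ring
  simp only [innerStep, h1, h2, PySem.List.pySetD_natCast, PySem.List.pyGetD_natCast]
  simp [List.getD]

theorem innerStep_zero (t a b c : Int) (rest : List Int) :
    innerStep t (a :: b :: rest) (0, c) = (a + c) :: (b + c * t) :: rest := by
  simp [innerStep, PySem.List.pySetD, PySem.List.pySet?, PySem.List.pyGetD, PySem.List.pyGet?,
        PySem.List.pyIdx?]
  have h0 : (0:Int) ≤ (rest.length : Int) + 1 := by positivity
  simp [h0]

theorem enum_shift : ∀ (p : List Int) (s : Int),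
    PySem.List.enumerate p s = (PySem.List.enumerate p 0).map (fun pr => (pr.1 + s, pr.2)) := by
  intro p
  induction p with
  | nil => intro s; simp [PySem.List.enumerate_nil]
  | cons c p ih =>
    intro s
    rw [PySem.List.enumerate_cons, PySem.List.enumerate_cons, ih (s + 1)]
    simp only [zero_add]
    rw [ih 1, List.map_cons, List.map_map]
    congr 1
    · simp
    · congr 1
      funext pr
      simp
      ring

theorem fold_shift (t : Int) : ∀ (l : List (Int × Int)) (x : Int) (np : List Int),
    (∀ pr ∈ l, 0 ≤ pr.1) →
    (l.map (fun pr => (pr.1 + 1, pr.2))).foldl (innerStep t) (x :: np)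
      = x :: l.foldl (innerStep t) np := by
  intro l
  induction l with
  | nil => intro x np _; rfl
  | cons ic l ih =>
    intro x np h
    obtain ⟨i, c⟩ := ic
    have hi : 0 ≤ i := h (i, c) (by simp)
    have : i = ((i.toNat : Nat) : Int) := by omega
    simp only [List.map_cons, List.foldl_cons]
    rw [this, innerStep_cons_succ, ih _ _ (fun pr hp => h pr (by simp [hp]))]


theorem enum_nonneg (p : List Int) : ∀ pr ∈ PySem.List.enumerate p 0, 0 ≤ pr.1 := by
  intro pr hpr
  rw [PySem.List.mem_enumerate_iff] at hpr
  obtain ⟨k, hk, rfl⟩ := hpr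
  simp

theorem A_inner (t : Int) : ∀ (p : List Int) (a : Int),
    (PySem.List.enumerate p 0).foldl (innerStep t) (a :: List.replicate p.length 0)
      = gpoly t p a := by
  intro p
  induction p with
  | nil => intro a; simp [gpoly]
  | cons c p ih =>
    intro a
    rw [PySem.List.enumerate_cons]
    simp only [List.length_cons, List.replicate_succ, List.foldl_cons, zero_add]
    rw [innerStep_zero, enum_shift p 1, fold_shift t _ _ _ (enum_nonneg p), ih]
    simp [gpoly]

theorem stepA_eq_gpoly (p : List Int) (t : Int) : stepA p t = gpoly t p 0 := by
  have : stepA p t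
      = (PySem.List.enumerate p 0).foldl (innerStep t) (List.replicate (p.length + 1) 0) := rfl
  rw [this, List.replicate_succ]
  exact A_inner t p 0

theorem foldl_stepA_ne_nil : ∀ (ys q : List Int), q ≠ [] → ys.foldl stepA q ≠ [] := by
  intro ys
  induction ys with
  | nil => intro q h; exact h
  | cons t ys ih =>
    intro q _
    rw [List.foldl_cons]
    exact ih _ (by rw [stepA_eq_gpoly]; exact gpoly_ne_nil t q 0)

theorem convPoly_foldl_stepA : ∀ (ys p q : List Int), p ≠ [] → q ≠ [] →
    convPoly p (ys.foldl stepA q) = ys.foldl stepA (convPoly p q) := by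
  intro ys
  induction ys with
  | nil => intro p q _ _; rfl
  | cons t ys ih =>
    intro p q hp hq
    simp only [List.foldl_cons]
    rw [stepA_eq_gpoly, ih p _ hp (gpoly_ne_nil t q 0), convPoly_gpoly t p q hp hq,
        ← stepA_eq_gpoly]

theorem alt_eq_A_aux : ∀ (n : Nat) (xs : List Int), xs.length ≤ n →
    make_lc_poly_alt xs = make_lc_poly xs := by
  intro n
  induction n with
  | zero =>
    intro xs h
    have : xs = [] := List.eq_nil_of_length_eq_zero (Nat.le_zero.mp h)
    subst this
    rw [make_lc_poly_alt]
    rfl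
  | succ n ih =>
    intro xs h
    match xs with
    | [] => rw [make_lc_poly_alt]; rfl
    | [t] =>
      rw [make_lc_poly_alt]
      show [1, t] = stepA [1] t
      rw [stepA_eq_gpoly]
      simp [gpoly]
    | a :: b :: rest =>
      rw [make_lc_poly_alt]
      have hlen : (a :: b :: rest).length = rest.length + 2 := by simp
      have h1 : ((a :: b :: rest).take ((a :: b :: rest).length / 2)).length ≤ n := by
        simp; omega
      have h2 : ((a :: b :: rest).drop ((a :: b :: rest).length / 2)).length ≤ n := by
        simp; omega
      rw [ih _ h1, ih _ h2]
      have hA : ∀ l : List Int, make_lc_poly l = l.foldl stepA [1] := fun _ => rfl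
      rw [hA, hA, hA]
      rw [convPoly_foldl_stepA _ _ [1] (foldl_stepA_ne_nil _ [1] (by simp)) (by simp),
          convPoly_one]
      rw [← List.foldl_append]
      rw [List.take_append_drop]

theorem alt_eq_A (xs : List Int) : make_lc_poly_alt xs = make_lc_poly xs :=
  alt_eq_A_aux xs.length xs le_rfl

-- ===== VERDICT (by name: the statement is the Claim_ definition above) =====
theorem make_lc_poly_spec : Claim_equal_make_lc_poly := by
  intro factors _
  unfold Spec_make_lc_poly
  exact (alt_eq_A factors).symm
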